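-- pv_equiv track=rewrite | github.com/leemnj/bioinfo-algorithm | chapter_06/ba6d.py | genome_to_edges
-- ===== SOURCE A (Python) =====
-- def chromosome_to_cycle(chromosome):
--     """
--     염색체(블록 리스트)를 노드 시퀀스로 변환합니다.
--     Block k -> Nodes 2k-1, 2k
--     +k: 2k-1 -> 2k (정방향)
--     -k: 2k -> 2k-1 (역방향)
--     반환되는 노드 리스트는 Head -> Tail 순서입니다.
--     """
--     nodes = []
--     for block in chromosome:
--         if block > 0:
--             nodes.append(2 * block - 1)
--             nodes.append(2 * block)
--         else:
--             nodes.append(2 * abs(block))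
--             nodes.append(2 * abs(block) - 1)
--     return nodes
--
-- def genome_to_edges(chromosomes):
--     """
--     유전체(염색체 리스트)를 Colored Edges(인접한 블록 간의 연결) 집합으로 변환합니다.
--     반환 형식: Dictionary {node: neighbor}
--     """
--     edges = {}
--     for chrom in chromosomes:
--         nodes = chromosome_to_cycle(chrom)
--         n = len(nodes)
--         # 염색체 내의 인접한 블록들을 연결 (블록의 Tail -> 다음 블록의 Head)
--         # nodes 배열은 [Head1, Tail1, Head2, Tail2, ...] 형태임
--         # 따라서 Tail1(idx 1) -> Head2(idx 2), Tail2(idx 3) -> Head3(idx 4)...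
--         for j in range(1, n, 2):
--             u = nodes[j]
--             v = nodes[(j + 1) % n] # 원형 연결
--             edges[u] = v
--             edges[v] = u
--     return edges
-- ===== SOURCE B (Python) =====
-- def _head_tail(block):
--     if block > 0:
--         return 2 * block - 1, 2 * block
--     return -2 * block, -2 * block - 1
--
-- def genome_to_edges(chromosomes):
--     edges = {}
--     for chrom in chromosomes:
--         if not chrom:
--             continue
--         first_head, prev_tail = _head_tail(chrom[0])
--         for block in chrom[1:]:
--             head, tail = _head_tail(block)
--             edges[prev_tail] = head
--             edges[head] = prev_tail
--             prev_tail = tail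
--         edges[prev_tail] = first_head
--         edges[first_head] = prev_tail
--     return edges
-- ===== Notes on version B (the rewrite author's own statement) =====
-- stated objective: simpler
-- what changed: B drops the intermediate per-chromosome node list and the index/modulo loop of A, instead making one pass over each chromosome's blocks computing head/tail from the sign and threading prev_tail/first_head state to emit the same edges in the same order.
import Mathlib
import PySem

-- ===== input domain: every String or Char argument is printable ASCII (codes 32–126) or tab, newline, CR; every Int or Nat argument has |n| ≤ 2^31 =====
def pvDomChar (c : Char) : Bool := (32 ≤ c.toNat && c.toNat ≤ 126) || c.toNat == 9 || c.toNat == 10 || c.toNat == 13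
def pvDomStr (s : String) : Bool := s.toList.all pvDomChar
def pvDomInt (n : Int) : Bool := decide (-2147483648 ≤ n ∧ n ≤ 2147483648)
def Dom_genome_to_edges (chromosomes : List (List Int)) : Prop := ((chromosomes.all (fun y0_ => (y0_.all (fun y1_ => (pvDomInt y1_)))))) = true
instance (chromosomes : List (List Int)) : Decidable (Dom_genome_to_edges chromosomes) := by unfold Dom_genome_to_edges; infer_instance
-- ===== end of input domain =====

-- B replaces A's intermediate node-list + index/mod loop by a single pass per chromosome
-- threading first_head/prev_tail state (objective: simpler decomposition, same cost).

-- ===== PORT A =====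
def chromosome_to_cycle (chromosome : List Int) : List Int :=
  chromosome.foldl (fun nodes block =>
    if block > 0 then (nodes ++ [2 * block - 1]) ++ [2 * block]
    else (nodes ++ [2 * |block|]) ++ [2 * |block| - 1]) []

-- the inner loop body of A ('for j in range(1, n, 2)'); pyGetD with default 0 is exact here:
-- every index drawn from range(1, n, 2) and (j+1) % n lies in range, so Python never raises.
def aStep (edges : PySem.Dict Int Int) (chrom : List Int) : PySem.Dict Int Int :=
  let nodes := chromosome_to_cycle chrom
  let n : Int := nodes.length
  (PySem.List.pyRange 1 n 2).foldl (fun edges j =>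
    let u := PySem.List.pyGetD nodes j 0
    let v := PySem.List.pyGetD nodes (PySem.Int.mod (j + 1) n) 0
    (edges.insert u v).insert v u) edges

def genome_to_edges (chromosomes : List (List Int)) : List (Int × Int) :=
  (chromosomes.foldl aStep PySem.Dict.empty).items

-- ===== PORT B =====
def blockHeadTail (block : Int) : Int × Int :=
  if block > 0 then (2 * block - 1, 2 * block) else (-2 * block, -2 * block - 1)

-- the loop body of B: skip empty chromosome, else thread (edges, prev_tail) over the rest
def bStep (edges : PySem.Dict Int Int) (chrom : List Int) : PySem.Dict Int Int :=
  match chrom with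
  | [] => edges
  | b :: rest =>
    let ht := blockHeadTail b
    let st := rest.foldl (fun (st : PySem.Dict Int Int × Int) blk =>
        let ht2 := blockHeadTail blk
        ((st.1.insert st.2 ht2.1).insert ht2.1 st.2, ht2.2)) (edges, ht.2)
    (st.1.insert st.2 ht.1).insert ht.1 st.2

def genome_to_edges_alt (chromosomes : List (List Int)) : List (Int × Int) :=
  (chromosomes.foldl bStep PySem.Dict.empty).items

-- ===== PRECONDITION & SPEC =====
def Spec_genome_to_edges (chromosomes : List (List Int)) (out : List (Int × Int)) : Prop := out = genome_to_edges_alt chromosomes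
instance (chromosomes : List (List Int)) (out : List (Int × Int)) : Decidable (Spec_genome_to_edges chromosomes out) := by unfold Spec_genome_to_edges; infer_instance

-- ===== CLAIM (what is proved, stated in full; the proofs are below) =====
def Claim_equal_genome_to_edges : Prop := ∀ (chromosomes : List (List Int)), Dom_genome_to_edges chromosomes → Spec_genome_to_edges chromosomes (genome_to_edges chromosomes)

-- ===== LEMMAS AND PROOFS =====

-- the two blocks of nodes a block contributes, in A's order
def pairFn (b : Int) : List Int := [(blockHeadTail b).1, (blockHeadTail b).2]

lemma cycle_eq_flatMap (c : List Int) : chromosome_to_cycle c = c.flatMap pairFn := by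
  have h : chromosome_to_cycle c = c.foldl (fun nodes b => nodes ++ pairFn b) [] := by
    unfold chromosome_to_cycle
    apply PySem.List.foldl_congr_mem
    intro acc x _
    by_cases hx : x > 0
    · simp [pairFn, blockHeadTail, hx]
    · have habs : |x| = -x := abs_of_nonpos (by omega)
      simp [pairFn, blockHeadTail, hx, habs]
  rw [h, PySem.List.foldl_append_eq_flatMap]
  simp

lemma length_cycle (c : List Int) : (chromosome_to_cycle c).length = 2 * c.length := by
  rw [cycle_eq_flatMap]
  induction c with
  | nil => rfl
  | cons b bs ih => simp [List.flatMap_cons, pairFn] at *; omega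

lemma flat_getD_even : ∀ (l : List Int) (k : Nat), k < l.length →
    (l.flatMap pairFn).getD (2 * k) 0 = (blockHeadTail (l.getD k 0)).1 := by
  intro l
  induction l with
  | nil => intro k hk; simp at hk
  | cons b bs ih =>
    intro k hk
    cases k with
    | zero => simp [pairFn]
    | succ k' =>
      have h2 : 2 * (k' + 1) = (2 * k' + 1) + 1 := by ring
      simp only [List.flatMap_cons, pairFn, h2, List.cons_append, List.getD_cons_succ,
        List.nil_append]
      exact ih k' (by simpa using hk)

lemma flat_getD_odd : ∀ (l : List Int) (k : Nat), k < l.length →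
    (l.flatMap pairFn).getD (2 * k + 1) 0 = (blockHeadTail (l.getD k 0)).2 := by
  intro l
  induction l with
  | nil => intro k hk; simp at hk
  | cons b bs ih =>
    intro k hk
    cases k with
    | zero => simp [pairFn]
    | succ k' =>
      have h2 : 2 * (k' + 1) + 1 = ((2 * k' + 1) + 1) + 1 := by ring
      simp only [List.flatMap_cons, pairFn, h2, List.cons_append, List.getD_cons_succ,
        List.nil_append]
      exact ih k' (by simpa using hk)

-- proof-side recursion that is what bStep's fold computes
def pairs (fh : Int) (pt : Int) : List Int → PySem.Dict Int Int → PySem.Dict Int Int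
  | [], e => (e.insert pt fh).insert fh pt
  | blk :: bs, e =>
      pairs fh (blockHeadTail blk).2 bs
        ((e.insert pt (blockHeadTail blk).1).insert (blockHeadTail blk).1 pt)

lemma bStep_eq_pairs_aux (fh : Int) : ∀ (bs : List Int) (e : PySem.Dict Int Int) (pt : Int),
    (let st := bs.foldl (fun (st : PySem.Dict Int Int × Int) blk =>
        let ht2 := blockHeadTail blk
        ((st.1.insert st.2 ht2.1).insert ht2.1 st.2, ht2.2)) (e, pt)
     (st.1.insert st.2 fh).insert fh st.2) = pairs fh pt bs e := by
  intro bs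
  induction bs with
  | nil => intro e pt; rfl
  | cons blk bs ih => intro e pt; simpa [pairs, List.foldl_cons] using ih _ _

def ins2 (e : PySem.Dict Int Int) (p : Int × Int) : PySem.Dict Int Int :=
  (e.insert p.1 p.2).insert p.2 p.1

lemma zip_fold_pairs (fh : Int) : ∀ (bs : List Int) (e : PySem.Dict Int Int) (pt : Int),
    ((pt :: bs.map (fun x => (blockHeadTail x).2)).zip
      (bs.map (fun x => (blockHeadTail x).1) ++ [fh])).foldl ins2 e = pairs fh pt bs e := by
  intro bs
  induction bs with
  | nil => intro e pt; rfl
  | cons blk bs ih =>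
    intro e pt
    simp only [List.map_cons, List.cons_append, List.zip_cons_cons, List.foldl_cons]
    exact ih _ _

lemma bStep_cons (e : PySem.Dict Int Int) (b : Int) (rest : List Int) :
    bStep e (b :: rest) = pairs (blockHeadTail b).1 (blockHeadTail b).2 rest e := by
  simpa [bStep] using bStep_eq_pairs_aux (blockHeadTail b).1 rest e (blockHeadTail b).2

lemma zip_eq_map_range (b : Int) (rest : List Int) :
    (List.range (rest.length + 1)).map (fun k =>
      ((blockHeadTail ((b :: rest).getD k 0)).2,
       (blockHeadTail ((b :: rest).getD ((k + 1) % (rest.length + 1)) 0)).1))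
    = ((blockHeadTail b).2 :: rest.map (fun x => (blockHeadTail x).2)).zip
        (rest.map (fun x => (blockHeadTail x).1) ++ [(blockHeadTail b).1]) := by
  apply List.ext_getElem
  · simp
  · intro i h1 h2
    simp only [List.length_map, List.length_range] at h1
    simp only [List.getElem_map, List.getElem_range, List.getElem_zip]
    have hfst : ((blockHeadTail b).2 :: rest.map (fun x => (blockHeadTail x).2))
        = (b :: rest).map (fun x => (blockHeadTail x).2) := rfl
    refine Prod.ext ?_ ?_
    · simp only [hfst, List.getElem_map]
      rw [List.getD_eq_getElem _ _ (by simpa using h1)]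
    · by_cases hi : i < rest.length
      · have hmod : (i + 1) % (rest.length + 1) = i + 1 := Nat.mod_eq_of_lt (by omega)
        rw [hmod]
        rw [List.getElem_append_left (by simpa using hi)]
        simp only [List.getElem_map]
        rw [List.getD_eq_getElem _ _ (by simpa using hi)]
        simp
      · have hie : i = rest.length := by omega
        subst hie
        have hmod : (rest.length + 1) % (rest.length + 1) = 0 := Nat.mod_self _
        rw [hmod]
        rw [List.getElem_append_right (by simp)]
        simp

lemma aStep_eq_bStep (e : PySem.Dict Int Int) (c : List Int) : aStep e c = bStep e c := by
  cases c with
  | nil => rfl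
  | cons b rest =>
    rw [bStep_cons]
    simp only [aStep]
    have hm1 : 1 ≤ rest.length + 1 := by omega
    have hlen : (chromosome_to_cycle (b :: rest)).length = 2 * (rest.length + 1) := by
      rw [length_cycle]; simp
    have hrange : PySem.List.pyRange 1 ((2 * (rest.length + 1) : Nat) : Int) 2
        = (List.range (rest.length + 1)).map (fun k : Nat => 1 + 2 * (k : Int)) := by
      rw [PySem.List.pyRange_of_pos _ _ (by norm_num : (0:Int) < 2)]
      congr 1
      rw [if_pos (by push_cast; omega)]
      have h2 : ((2 * (rest.length + 1) : Nat) : Int) - 1 + 2 - 1 = 2 * ((rest.length + 1 : Nat) : Int) := by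
        push_cast; ring
      rw [h2, Int.mul_ediv_cancel_left _ (by norm_num)]
      simp
    rw [hlen, hrange, List.foldl_map]
    refine Eq.trans (PySem.List.foldl_congr_mem _ _
      (fun acc k => ins2 acc ((blockHeadTail ((b :: rest).getD k 0)).2,
        (blockHeadTail ((b :: rest).getD ((k + 1) % (rest.length + 1)) 0)).1)) _ ?_) ?_
    · intro acc k hk
      simp only [List.mem_range] at hk
      have hu : PySem.List.pyGetD (chromosome_to_cycle (b :: rest)) (1 + 2 * (k : Int)) 0
          = (blockHeadTail ((b :: rest).getD k 0)).2 := by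
        rw [cycle_eq_flatMap, PySem.List.pyGetD_of_nonneg _ _ (by positivity)]
        have ht : ((1 : Int) + 2 * (k : Int)).toNat = 2 * k + 1 := by omega
        rw [ht]
        exact flat_getD_odd _ k (by simpa using hk)
      have harg : (1 + 2 * (k : Int)) + 1 = 2 * ((k : Int) + 1) := by ring
      have hv : PySem.List.pyGetD (chromosome_to_cycle (b :: rest))
          (PySem.Int.mod ((1 + 2 * (k : Int)) + 1) ((2 * (rest.length + 1) : Nat) : Int)) 0
          = (blockHeadTail ((b :: rest).getD ((k + 1) % (rest.length + 1)) 0)).1 := by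
        rw [cycle_eq_flatMap]
        by_cases hlt : k + 1 < rest.length + 1
        · have hfm : PySem.Int.mod ((1 + 2 * (k : Int)) + 1) ((2 * (rest.length + 1) : Nat) : Int)
              = 2 * ((k : Int) + 1) := by
            simp only [PySem.Int.mod, harg]
            exact Int.fmod_eq_of_lt (by positivity) (by push_cast; omega)
          rw [hfm, PySem.List.pyGetD_of_nonneg _ _ (by positivity)]
          have ht : (2 * ((k : Int) + 1)).toNat = 2 * (k + 1) := by omega
          rw [ht, Nat.mod_eq_of_lt hlt]
          exact flat_getD_even _ (k + 1) (by simpa using hlt)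
        · have hke : k + 1 = rest.length + 1 := by omega
          have hfm : PySem.Int.mod ((1 + 2 * (k : Int)) + 1) ((2 * (rest.length + 1) : Nat) : Int)
              = 0 := by
            simp only [PySem.Int.mod, harg]
            have : 2 * ((k : Int) + 1) = ((2 * (rest.length + 1) : Nat) : Int) := by
              push_cast; omega
            rw [this, Int.fmod_eq_emod]
            simp
          rw [hfm, PySem.List.pyGetD_of_nonneg _ _ le_rfl]
          rw [hke, Nat.mod_self]
          simpa using flat_getD_even (b :: rest) 0 (by simp)
      simp only [ins2]
      rw [← hu, ← hv]
    · rw [← List.foldl_map, zip_eq_map_range, zip_fold_pairs]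

theorem genome_to_edges_spec : Claim_equal_genome_to_edges := by
  intro chromosomes _
  unfold Spec_genome_to_edges genome_to_edges genome_to_edges_alt
  have h : aStep = bStep := funext fun e => funext fun c => aStep_eq_bStep e c
  rw [h]
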